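-- pv_equiv track=rewrite | github.com/axioradev/edinet-xbrl | src/edinet_xbrl/parser.py | _pick_best_entry
-- ===== SOURCE A (Python) =====
-- def _pick_best_entry(
--     entries: list[tuple[str, str, str]],
--     current_year_ctx: set[str],
--     consolidated_ctx: set[str],
-- ) -> tuple[str, str, str] | None:
--     """Pick best entry: current-year consolidated > current-year > first."""
--     for entry in entries:
--         if entry[1] in current_year_ctx and entry[1] in consolidated_ctx:
--             return entry
--     for entry in entries:
--         if entry[1] in current_year_ctx:
--             return entry
--     return entries[0] if entries else None
-- ===== SOURCE B (Python) =====
-- def _pick_best_entry(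
--     entries: list[tuple[str, str, str]],
--     current_year_ctx: set[str],
--     consolidated_ctx: set[str],
-- ) -> tuple[str, str, str] | None:
--     """Rank entries (0=current-year consolidated, 1=current-year, 2=other) and
--     take min by rank; Python's min returns the first minimal element."""
--     if not entries:
--         return None
--
--     def rank(entry):
--         if entry[1] in current_year_ctx:
--             return 0 if entry[1] in consolidated_ctx else 1
--         return 2
--
--     return min(entries, key=rank)
-- ===== Notes on version B (the rewrite author's own statement) =====
-- stated objective: alternative
-- what changed: Replaces A's two staged scans with a rank function (0 current-year consolidated, 1 current-year, 2 other) and a single min-by-rank, relying on min returning the first minimal element.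
import Mathlib
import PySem

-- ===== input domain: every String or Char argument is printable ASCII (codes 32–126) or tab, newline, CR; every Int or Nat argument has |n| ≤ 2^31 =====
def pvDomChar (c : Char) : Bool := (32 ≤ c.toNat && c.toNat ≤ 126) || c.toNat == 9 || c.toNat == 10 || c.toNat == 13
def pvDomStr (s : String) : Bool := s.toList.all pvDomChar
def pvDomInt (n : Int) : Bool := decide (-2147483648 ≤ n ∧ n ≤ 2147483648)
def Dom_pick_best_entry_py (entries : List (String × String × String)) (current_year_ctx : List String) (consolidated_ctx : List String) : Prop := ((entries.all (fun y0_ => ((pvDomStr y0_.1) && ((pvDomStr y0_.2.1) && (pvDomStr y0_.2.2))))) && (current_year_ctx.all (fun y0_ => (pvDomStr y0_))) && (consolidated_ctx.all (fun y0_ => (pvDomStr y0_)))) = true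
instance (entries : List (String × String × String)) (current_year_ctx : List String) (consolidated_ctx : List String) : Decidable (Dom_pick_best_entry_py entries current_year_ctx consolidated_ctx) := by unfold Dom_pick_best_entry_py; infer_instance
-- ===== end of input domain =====

-- B replaces A's two staged scans with a rank function (0/1/2) and a single min-by-rank; alternative decomposition, same O(n).
-- ===== PORT A =====
-- first loop of A: return the first entry whose entry[1] is in both sets
def pickBothLoop (cy cons : List String) : List (String × String × String) → Option (String × String × String)
  | [] => none
  | e :: rest =>
    if e.2.1 ∈ cy ∧ e.2.1 ∈ cons then some e else pickBothLoop cy cons rest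

-- second loop of A: return the first entry whose entry[1] is in current_year_ctx
def pickCyLoop (cy : List String) : List (String × String × String) → Option (String × String × String)
  | [] => none
  | e :: rest =>
    if e.2.1 ∈ cy then some e else pickCyLoop cy rest

def pick_best_entry_py (entries : List (String × String × String)) (current_year_ctx : List String) (consolidated_ctx : List String) : Option (String × String × String) :=
  match pickBothLoop current_year_ctx consolidated_ctx entries with
  | some e => some e
  | none =>
    match pickCyLoop current_year_ctx entries with
    | some e => some e
    | none => match entries with
      | [] => none
      | e :: _ => some e

-- ===== PORT B =====
-- B's priority rank of an entry: 0 = current-year consolidated, 1 = current-year, 2 = other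
def pvRank (cy cons : List String) (e : String × String × String) : Int :=
  if e.2.1 ∈ cy then (if e.2.1 ∈ cons then 0 else 1) else 2

def pick_best_entry_py_alt (entries : List (String × String × String)) (current_year_ctx : List String) (consolidated_ctx : List String) : Option (String × String × String) :=
  match entries with
  | [] => none
  | _ :: _ => PySem.List.min? entries (pvRank current_year_ctx consolidated_ctx)

-- ===== PRECONDITION & SPEC =====
def Spec_pick_best_entry_py (entries : List (String × String × String)) (current_year_ctx : List String) (consolidated_ctx : List String) (out : Option (String × String × String)) : Prop := out = pick_best_entry_py_alt entries current_year_ctx consolidated_ctx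
instance (entries : List (String × String × String)) (current_year_ctx : List String) (consolidated_ctx : List String) (out : Option (String × String × String)) : Decidable (Spec_pick_best_entry_py entries current_year_ctx consolidated_ctx out) := by unfold Spec_pick_best_entry_py; infer_instance

-- ===== CLAIM (what is proved, stated in full; the proofs are below) =====
def Claim_equal_pick_best_entry_py : Prop := ∀ (entries : List (String × String × String)) (current_year_ctx : List String) (consolidated_ctx : List String), Dom_pick_best_entry_py entries current_year_ctx consolidated_ctx → Spec_pick_best_entry_py entries current_year_ctx consolidated_ctx (pick_best_entry_py entries current_year_ctx consolidated_ctx)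

-- ===== LEMMAS AND PROOFS =====
-- the step of Python's min fold (first minimal element kept)
def minStep (cy cons : List String) (acc : Option (String × String × String)) (x : String × String × String) : Option (String × String × String) :=
  match acc with
  | none => some x
  | some m => if pvRank cy cons x < pvRank cy cons m then some x else some m

theorem pvRank_nonneg (cy cons : List String) (e : String × String × String) :
    0 ≤ pvRank cy cons e := by
  unfold pvRank; split_ifs <;> norm_num

-- once a rank-0 element is the accumulator, the fold never replaces it
theorem fold_rank0 (cy cons : List String) (m : String × String × String)
    (h : pvRank cy cons m = 0) (t : List (String × String × String)) :
    t.foldl (minStep cy cons) (some m) = some m := by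
  induction t with
  | nil => rfl
  | cons x t ih =>
    have hx := pvRank_nonneg cy cons x
    simp only [List.foldl, minStep, h]
    rw [if_neg (by omega)]
    exact ih

-- with a rank-1 accumulator, the fold returns the first both-match if any, else the accumulator
theorem fold_rank1 (cy cons : List String) (m : String × String × String)
    (h : pvRank cy cons m = 1) (t : List (String × String × String)) :
    t.foldl (minStep cy cons) (some m) =
      match pickBothLoop cy cons t with
      | some e => some e
      | none => some m := by
  induction t with
  | nil => rfl
  | cons x t ih =>
    simp only [List.foldl, minStep, h, pickBothLoop]
    by_cases hb : x.2.1 ∈ cy ∧ x.2.1 ∈ cons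
    · have hx : pvRank cy cons x = 0 := by simp [pvRank, hb.1, hb.2]
      rw [hx, if_pos (by norm_num), if_pos hb]
      exact fold_rank0 cy cons x hx t
    · have hx : ¬ pvRank cy cons x < 1 := by
        unfold pvRank
        rcases not_and_or.mp hb with hb' | hb' <;> simp [hb'] <;> split_ifs <;> omega
      rw [if_neg hx, if_neg hb]
      exact ih

-- with a rank-2 accumulator, the fold realises A's full priority over the tail
theorem fold_rank2 (cy cons : List String) (m : String × String × String)
    (h : pvRank cy cons m = 2) (t : List (String × String × String)) :
    t.foldl (minStep cy cons) (some m) =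
      match pickBothLoop cy cons t with
      | some e => some e
      | none =>
        match pickCyLoop cy t with
        | some e => some e
        | none => some m := by
  induction t with
  | nil => rfl
  | cons x t ih =>
    simp only [List.foldl, minStep, h, pickBothLoop, pickCyLoop]
    by_cases hcy : x.2.1 ∈ cy
    · by_cases hco : x.2.1 ∈ cons
      · have hx : pvRank cy cons x = 0 := by simp [pvRank, hcy, hco]
        rw [hx, if_pos (by norm_num), if_pos ⟨hcy, hco⟩]
        exact fold_rank0 cy cons x hx t
      · have hx : pvRank cy cons x = 1 := by simp [pvRank, hcy, hco]
        rw [hx, if_pos (by norm_num), if_neg (by simp [hco]), if_pos hcy]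
        exact fold_rank1 cy cons x hx t
    · have hx : pvRank cy cons x = 2 := by simp [pvRank, hcy]
      rw [hx, if_neg (by norm_num), if_neg (by simp [hcy]), if_neg hcy]
      exact ih

-- ===== VERDICT (by name: the statement is the Claim_ definition above) =====
theorem pick_best_entry_py_spec : Claim_equal_pick_best_entry_py := by
  intro entries cy cons _
  unfold Spec_pick_best_entry_py pick_best_entry_py pick_best_entry_py_alt
  cases entries with
  | nil => rfl
  | cons e t =>
    have hmin : PySem.List.min? (e :: t) (pvRank cy cons) =
        t.foldl (minStep cy cons) (some e) := by
      simp only [PySem.List.min?, List.foldl]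
      congr 1
      funext acc x
      cases acc <;> rfl
    rw [hmin]
    by_cases hcy : e.2.1 ∈ cy
    · by_cases hco : e.2.1 ∈ cons
      · have hx : pvRank cy cons e = 0 := by simp [pvRank, hcy, hco]
        rw [fold_rank0 cy cons e hx t]
        simp [pickBothLoop, hcy, hco]
      · have hx : pvRank cy cons e = 1 := by simp [pvRank, hcy, hco]
        rw [fold_rank1 cy cons e hx t]
        cases hpb : pickBothLoop cy cons t <;>
          simp [pickBothLoop, pickCyLoop, hcy, hco, hpb]
    · have hx : pvRank cy cons e = 2 := by simp [pvRank, hcy]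
      rw [fold_rank2 cy cons e hx t]
      cases hpb : pickBothLoop cy cons t <;> cases hpc : pickCyLoop cy t <;>
        simp [pickBothLoop, pickCyLoop, hcy, hpb, hpc]
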